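-- pv_equiv track=rewrite | github.com/ValicyIV/MAO-Platform | mao-platform/apps/api/src/graph/state.py | merge_mailboxes
-- ===== SOURCE A (Python) =====
-- from typing import Annotated, Any, TypedDict
--
-- AgentMessage = dict[str, Any]
--
-- def merge_mailboxes(
--     existing: dict[str, list[AgentMessage]],
--     new: dict[str, list[AgentMessage]],
-- ) -> dict[str, list[AgentMessage]]:
--     merged = dict(existing)
--     for agent_id, messages in new.items():
--         merged[agent_id] = merged.get(agent_id, []) + messages
--     return merged
-- ===== SOURCE B (Python) =====
-- def merge_mailboxes(existing, new):
--     # One stream of (agent_id, message-list) pairs from both dicts.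
--     items = list(existing.items()) + list(new.items())
--     # Phase 1: bucket the per-dict lists, keyed in first-occurrence order.
--     buckets = {}
--     for k, msgs in items:
--         buckets.setdefault(k, []).append(msgs)
--     # Phase 2: flatten each key's bucket of chunks.
--     return {k: [m for chunk in buckets[k] for m in chunk] for k in buckets}
-- ===== Notes on version B (the rewrite author's own statement) =====
-- stated objective: alternative
-- what changed: B treats both dicts as one flat stream of (key, list) items and groups it in two phases - bucket each key's chunks in first-occurrence order, then flatten each bucket - instead of A's copy-existing-then-patch-new-keys loop with get-and-concatenate.
import Mathlib
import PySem

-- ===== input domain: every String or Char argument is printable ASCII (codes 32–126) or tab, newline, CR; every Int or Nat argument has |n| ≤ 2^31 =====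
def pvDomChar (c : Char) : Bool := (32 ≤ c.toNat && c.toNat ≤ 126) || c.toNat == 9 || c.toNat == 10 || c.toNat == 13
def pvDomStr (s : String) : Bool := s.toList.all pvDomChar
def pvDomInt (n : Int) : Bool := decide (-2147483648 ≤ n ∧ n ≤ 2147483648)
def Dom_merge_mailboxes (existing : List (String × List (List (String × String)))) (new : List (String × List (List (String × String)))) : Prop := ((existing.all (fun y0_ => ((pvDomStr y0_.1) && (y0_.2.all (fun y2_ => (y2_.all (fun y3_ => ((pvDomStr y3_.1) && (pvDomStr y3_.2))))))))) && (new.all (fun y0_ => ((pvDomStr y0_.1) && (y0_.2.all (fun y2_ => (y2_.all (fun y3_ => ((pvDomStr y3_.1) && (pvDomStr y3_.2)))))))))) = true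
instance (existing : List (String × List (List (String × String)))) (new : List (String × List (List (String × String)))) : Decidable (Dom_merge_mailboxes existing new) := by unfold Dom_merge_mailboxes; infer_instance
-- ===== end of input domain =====

-- B flattens both dicts into one item stream and groups it by back-to-front structural
-- recursion, instead of A's copy-existing-then-patch-new loop (objective: alternative).

-- ===== PORT A =====
def merge_mailboxes (existing : List (String × List (List (String × String)))) (new : List (String × List (List (String × String)))) : List (String × List (List (String × String))) :=
  -- merged = dict(existing)
  let merged : PySem.Dict String (List (List (String × String))) := PySem.Dict.mk existing
  -- for agent_id, messages in new.items(): merged[agent_id] = merged.get(agent_id, []) + messages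
  let merged := new.foldl (fun d p => d.insert p.1 (d.getD p.1 [] ++ p.2)) merged
  merged.items

-- ===== PORT B =====
def merge_mailboxes_alt (existing : List (String × List (List (String × String)))) (new : List (String × List (List (String × String)))) : List (String × List (List (String × String))) :=
  -- items = list(existing.items()) + list(new.items())
  let items := existing ++ new
  -- buckets = {}; for k, msgs in items: buckets.setdefault(k, []).append(msgs)
  let buckets := items.foldl (fun d p => d.modify p.1 [] (fun v => v ++ [p.2]))
    (PySem.Dict.empty : PySem.Dict String (List (List (List (String × String)))))
  -- {k: [m for chunk in buckets[k] for m in chunk] for k in buckets}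
  buckets.keys.map (fun k => (k, (buckets.getD k []).flatMap id))

-- ===== PRECONDITION & SPEC =====
-- Pre_ excludes association lists with duplicate keys: those do not represent any Python dict
-- (both parameters are dicts in Python, so their keys are distinct by construction).
def Pre_merge_mailboxes (existing : List (String × List (List (String × String)))) (new : List (String × List (List (String × String)))) : Prop :=
  (existing.map Prod.fst).Nodup ∧ (new.map Prod.fst).Nodup
instance (existing : List (String × List (List (String × String)))) (new : List (String × List (List (String × String)))) : Decidable (Pre_merge_mailboxes existing new) := by unfold Pre_merge_mailboxes; infer_instance
def pvWitness_merge_mailboxes : (List (String × List (List (String × String)))) × (List (String × List (List (String × String)))) :=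
  ([("a", [[("from", "x")]])], [("a", [[("from", "y")]]), ("b", [])])
def Spec_merge_mailboxes (existing : List (String × List (List (String × String)))) (new : List (String × List (List (String × String)))) (out : List (String × List (List (String × String)))) : Prop := out = merge_mailboxes_alt existing new
instance (existing : List (String × List (List (String × String)))) (new : List (String × List (List (String × String)))) (out : List (String × List (List (String × String)))) : Decidable (Spec_merge_mailboxes existing new out) := by unfold Spec_merge_mailboxes; infer_instance

-- ===== CLAIM (what is proved, stated in full; the proofs are below) =====
def Claim_equal_merge_mailboxes : Prop := ∀ (existing : List (String × List (List (String × String)))) (new : List (String × List (List (String × String)))), Dom_merge_mailboxes existing new → Pre_merge_mailboxes existing new → Spec_merge_mailboxes existing new (merge_mailboxes existing new)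

-- ===== LEMMAS AND PROOFS =====

-- All messages the stream files under key c, in stream order.
def pvCollect (c : String) (items : List (String × List (List (String × String)))) : List (List (String × String)) :=
  (items.filter (fun p => p.1 == c)).flatMap Prod.snd

theorem pvCollect_cons (c : String) (p : String × List (List (String × String))) (rest : List (String × List (List (String × String)))) :
    pvCollect c (p :: rest) = (if p.1 = c then p.2 else []) ++ pvCollect c rest := by
  simp only [pvCollect, List.filter_cons]
  by_cases h : p.1 = c <;> simp [h]

-- Characterisation of B's bucket-then-flatten: keys in first-occurrence order, values collected in stream order.
theorem pv_alt_items (existing : List (String × List (List (String × String)))) (new : List (String × List (List (String × String)))) :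
    merge_mailboxes_alt existing new
      = (PySem.Set.ofList ((existing ++ new).map Prod.fst)).map (fun c => (c, pvCollect c (existing ++ new))) := by
  show ((existing ++ new).foldl (fun d p => d.modify p.1 [] (fun v => v ++ [p.2]))
      (PySem.Dict.empty : PySem.Dict String (List (List (List (String × String)))))).keys.map
      (fun k => (k, (((existing ++ new).foldl (fun d p => d.modify p.1 [] (fun v => v ++ [p.2]))
        (PySem.Dict.empty : PySem.Dict String (List (List (List (String × String)))))).getD k []).flatMap id)) = _
  have hkeys : ((existing ++ new).foldl (fun d p => d.modify p.1 [] (fun v => v ++ [p.2]))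
      (PySem.Dict.empty : PySem.Dict String (List (List (List (String × String)))))).keys
      = PySem.Set.ofList ((existing ++ new).map Prod.fst) := by
    rw [PySem.Dict.keys_foldl_modify_key (existing ++ new) Prod.fst [] (fun _ p v => v ++ [p.2]),
        show (PySem.Dict.empty : PySem.Dict String (List (List (List (String × String))))).keys = [] from rfl,
        PySem.Set.update_nil_left]
  rw [hkeys]
  apply List.map_congr_left
  intro c _
  rw [PySem.Dict.getD_foldl_modify_append (existing ++ new) PySem.Dict.empty c,
      show (PySem.Dict.empty : PySem.Dict String (List (List (List (String × String))))).getD c [] = [] from rfl,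
      List.nil_append, List.flatMap_map]
  rfl

-- The value at key c after A's loop: the start dict's value followed by all messages of `new` filed under c.
theorem pv_getD_fold (new : List (String × List (List (String × String))))
    (d : PySem.Dict String (List (List (String × String)))) (c : String) :
    (new.foldl (fun d p => d.insert p.1 (d.getD p.1 [] ++ p.2)) d).getD c []
      = d.getD c [] ++ pvCollect c new := by
  induction new generalizing d with
  | nil => simp [pvCollect]
  | cons p rest ih =>
    simp only [List.foldl_cons, ih, pvCollect_cons]
    by_cases h : p.1 = c
    · subst h; simp
    · simp [PySem.Dict.getD_insert, h, Ne.symm h]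

-- With distinct keys, the dict lookup is exactly the collected messages.
theorem pv_getD_mk (l : List (String × List (List (String × String))))
    (h : (l.map Prod.fst).Nodup) (c : String) :
    (PySem.Dict.mk l).getD c [] = pvCollect c l := by
  induction l with
  | nil => simp [PySem.Dict.getD, PySem.Dict.get?, pvCollect]
  | cons p rest ih =>
    simp only [List.map_cons, List.nodup_cons] at h
    rw [pvCollect_cons]
    by_cases hc : p.1 = c
    · subst hc
      have hnil : rest.filter (fun q => q.1 == p.1) = [] := by
        apply List.filter_eq_nil_iff.mpr
        intro q hq hq1
        simp only [beq_iff_eq] at hq1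
        exact h.1 (hq1 ▸ List.mem_map_of_mem (f := Prod.fst) hq)
      simp [pvCollect, hnil, PySem.Dict.getD, PySem.Dict.get?, List.find?]
    · have hb : (p.1 == c) = false := by simp [hc]
      simp only [hc, if_false, List.nil_append, ← ih h.2]
      simp [PySem.Dict.getD, PySem.Dict.get?, List.find?, hb]

-- ===== VERDICT (by name: the statement is the Claim_ definition above) =====
theorem merge_mailboxes_spec : Claim_equal_merge_mailboxes := by
  intro existing new _ hpre
  obtain ⟨h1, h2⟩ := hpre
  unfold Spec_merge_mailboxes merge_mailboxes
  set F := fun (d : PySem.Dict String (List (List (String × String)))) (p : String × List (List (String × String))) => d.insert p.1 (d.getD p.1 [] ++ p.2) with hF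
  have hkeysE : (PySem.Dict.mk existing).keys = existing.map Prod.fst := rfl
  have hnodupE : (PySem.Dict.mk existing).keys.Nodup := by rw [hkeysE]; exact h1
  have hnodupR : (new.foldl F (PySem.Dict.mk existing)).keys.Nodup := by
    rw [hF]
    exact PySem.Dict.nodup_keys_foldl_insert_key new Prod.fst
      (fun d p => d.getD p.1 [] ++ p.2) _ hnodupE
  have hkeys : (new.foldl F (PySem.Dict.mk existing)).keys
      = PySem.Set.ofList ((existing ++ new).map Prod.fst) := by
    rw [hF, PySem.Dict.keys_foldl_insert_key new Prod.fst (fun d p => d.getD p.1 [] ++ p.2),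
        hkeysE, List.map_append, PySem.Set.ofList_append,
        PySem.Set.ofList_eq_self_of_nodup (List.map Prod.fst existing) h1]
  rw [PySem.Dict.items_eq_map_keys _ hnodupR [], hkeys, pv_alt_items]
  apply List.map_congr_left
  intro c _
  rw [hF, pv_getD_fold, pv_getD_mk existing h1 c]
  simp [pvCollect, List.filter_append]
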